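-- pv_equiv track=rewrite | github.com/AilvenLiu/tvm | python/tvm/tirx/op_dispatch/cuda/reduction.py | _analyze_axes
-- ===== SOURCE A (Python) =====
-- def _analyze_axes(src_ndim: int, reduce_axes: tuple[int, ...]) -> tuple[list[int], list[int]]:
--     """Normalize negative axes -> (reduce_dim_set, spatial_dim_list)."""
--     reduce_dims = set()
--     for ax in reduce_axes:
--         a = ax if ax >= 0 else ax + src_ndim
--         assert 0 <= a < src_ndim, f"reduce axis {ax} out of range for ndim={src_ndim}"
--         reduce_dims.add(a)
--     spatial_dims = [d for d in range(src_ndim) if d not in reduce_dims]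
--     return sorted(reduce_dims), spatial_dims
-- ===== SOURCE B (Python) =====
-- def _analyze_axes(src_ndim: int, reduce_axes: tuple[int, ...]) -> tuple[list[int], list[int]]:
--     """Normalize negative axes -> (reduce_dim_set, spatial_dim_list)."""
--     norm = []
--     for ax in reduce_axes:
--         a = ax if ax >= 0 else ax + src_ndim
--         assert 0 <= a < src_ndim, f"reduce axis {ax} out of range for ndim={src_ndim}"
--         norm.append(a)
--     norm.sort()
--     reduce_list: list[int] = []
--     spatial_list: list[int] = []
--     prev = -1
--     for a in norm:
--         if a != prev:
--             spatial_list.extend(range(prev + 1, a))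
--             reduce_list.append(a)
--             prev = a
--     spatial_list.extend(range(prev + 1, src_ndim))
--     return reduce_list, spatial_list
-- ===== Notes on version B (the rewrite author's own statement) =====
-- stated objective: alternative
-- what changed: Replaces the hash set + membership scan over range(src_ndim) with sort-then-sweep: normalized axes are sorted once, deduplicated by comparing with the previous axis, and spatial dims are emitted as the gap ranges between consecutive reduce dims (no membership structure at all).
import Mathlib
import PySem

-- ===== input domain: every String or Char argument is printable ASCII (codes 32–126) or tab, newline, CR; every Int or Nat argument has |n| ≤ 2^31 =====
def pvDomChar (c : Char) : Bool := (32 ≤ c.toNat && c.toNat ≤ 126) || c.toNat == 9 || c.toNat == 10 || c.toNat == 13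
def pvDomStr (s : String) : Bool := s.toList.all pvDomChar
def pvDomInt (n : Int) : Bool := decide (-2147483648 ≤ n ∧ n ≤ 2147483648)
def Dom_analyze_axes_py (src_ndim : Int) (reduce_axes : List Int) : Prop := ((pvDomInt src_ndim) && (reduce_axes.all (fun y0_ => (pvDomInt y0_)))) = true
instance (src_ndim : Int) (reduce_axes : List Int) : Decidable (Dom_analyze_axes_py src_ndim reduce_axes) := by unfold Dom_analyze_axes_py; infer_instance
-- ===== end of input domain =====

-- B replaces the set + membership scan with sort-then-sweep: sort the normalized axes, dedupe
-- against the previous one, and emit spatial dims as the gap ranges between reduce dims (objective: alternative).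

-- ===== PORT A =====
-- literal transliteration of A: build the set by folding Set.add, filter range by membership, sort the set.
def analyze_axes_py (src_ndim : Int) (reduce_axes : List Int) : List Int × List Int :=
  let reduce_dims : PySem.Set Int :=
    reduce_axes.foldl
      (fun s ax => PySem.Set.add s (if ax ≥ 0 then ax else ax + src_ndim))
      PySem.Set.empty
  let spatial_dims :=
    (PySem.List.pyRange 0 src_ndim 1).filter (fun d => !(PySem.Set.contains reduce_dims d))
  (PySem.List.sorted reduce_dims (fun x => x) false, spatial_dims)

-- ===== PORT B =====
-- literal transliteration of Source B: append-normalize, sort, then one sweep over the sorted axes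
-- with state (reduce_list, spatial_list, prev) emitting gap ranges; final extend to src_ndim.
def analyze_axes_py_alt (src_ndim : Int) (reduce_axes : List Int) : List Int × List Int :=
  let norm : List Int :=
    reduce_axes.foldl (fun acc ax => acc ++ [if ax ≥ 0 then ax else ax + src_ndim]) []
  let s := PySem.List.sorted norm (fun x => x) false
  let st :=
    s.foldl
      (fun (st : List Int × List Int × Int) a =>
        if a ≠ st.2.2 then
          (st.1 ++ [a], st.2.1 ++ PySem.List.pyRange (st.2.2 + 1) a 1, a)
        else st)
      ([], [], -1)
  (st.1, st.2.1 ++ PySem.List.pyRange (st.2.2 + 1) src_ndim 1)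

-- ===== PRECONDITION & SPEC =====
-- Pre_ excludes exactly the inputs on which A's assert fires (AssertionError): some axis whose
-- normalized value falls outside [0, src_ndim).
def Pre_analyze_axes_py (src_ndim : Int) (reduce_axes : List Int) : Prop :=
  ∀ ax ∈ reduce_axes,
    0 ≤ (if ax ≥ 0 then ax else ax + src_ndim) ∧ (if ax ≥ 0 then ax else ax + src_ndim) < src_ndim

instance (src_ndim : Int) (reduce_axes : List Int) : Decidable (Pre_analyze_axes_py src_ndim reduce_axes) := by
  unfold Pre_analyze_axes_py; infer_instance

def pvWitness_analyze_axes_py : Int × List Int := (4, [0, -1, 2])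

def Spec_analyze_axes_py (src_ndim : Int) (reduce_axes : List Int) (out : List Int × List Int) : Prop :=
  out = analyze_axes_py_alt src_ndim reduce_axes
instance (src_ndim : Int) (reduce_axes : List Int) (out : List Int × List Int) : Decidable (Spec_analyze_axes_py src_ndim reduce_axes out) := by
  unfold Spec_analyze_axes_py; infer_instance

-- ===== CLAIM (what is proved, stated in full; the proofs are below) =====
def Claim_equal_analyze_axes_py : Prop := ∀ (src_ndim : Int) (reduce_axes : List Int), Dom_analyze_axes_py src_ndim reduce_axes → Pre_analyze_axes_py src_ndim reduce_axes → Spec_analyze_axes_py src_ndim reduce_axes (analyze_axes_py src_ndim reduce_axes)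

-- ===== LEMMAS AND PROOFS =====

-- the normalize-append fold is map
theorem pv_norm_map (src_ndim : Int) (axes : List Int) (acc : List Int) :
    axes.foldl (fun acc ax => acc ++ [if ax ≥ 0 then ax else ax + src_ndim]) acc
    = acc ++ axes.map (fun ax => if ax ≥ 0 then ax else ax + src_ndim) := by
  induction axes generalizing acc with
  | nil => simp
  | cons a t ih => simp [ih]

-- the gap sweep, finalized to n, partitions pyRange (p+1) n 1 by membership in the sorted list s
theorem pv_gap_fold (n : Int) (s : List Int) (r sp : List Int) (p : Int)
    (hs : s.Pairwise (· ≤ ·)) (hlo : ∀ x ∈ s, p ≤ x) (hhi : ∀ x ∈ s, x < n) :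
    ((s.foldl
        (fun (st : List Int × List Int × Int) a =>
          if a ≠ st.2.2 then
            (st.1 ++ [a], st.2.1 ++ PySem.List.pyRange (st.2.2 + 1) a 1, a)
          else st)
        (r, sp, p)).1,
     (s.foldl
        (fun (st : List Int × List Int × Int) a =>
          if a ≠ st.2.2 then
            (st.1 ++ [a], st.2.1 ++ PySem.List.pyRange (st.2.2 + 1) a 1, a)
          else st)
        (r, sp, p)).2.1
      ++ PySem.List.pyRange
          ((s.foldl
              (fun (st : List Int × List Int × Int) a =>
                if a ≠ st.2.2 then
                  (st.1 ++ [a], st.2.1 ++ PySem.List.pyRange (st.2.2 + 1) a 1, a)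
                else st)
              (r, sp, p)).2.2 + 1) n 1)
    = (r ++ (PySem.List.pyRange (p + 1) n 1).filter (fun d => decide (d ∈ s)),
       sp ++ (PySem.List.pyRange (p + 1) n 1).filter (fun d => !(decide (d ∈ s)))) := by
  induction s generalizing r sp p with
  | nil =>
    simp
  | cons a t ih =>
    have ha_lo : p ≤ a := hlo a (by simp)
    have ha_hi : a < n := hhi a (by simp)
    have ht_ge : ∀ x ∈ t, a ≤ x := by
      intro x hx; exact (List.pairwise_cons.mp hs).1 x hx
    by_cases hap : a = p
    · -- duplicate of prev: skipped
      subst hap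
      simp only [List.foldl_cons]
      rw [if_neg (fun h : a ≠ a => h rfl)]
      rw [ih r sp a (List.pairwise_cons.mp hs).2 ht_ge (fun x hx => hhi x (by simp [hx]))]
      have hcong : ∀ d ∈ PySem.List.pyRange (a + 1) n 1,
          decide (d ∈ t) = decide (d ∈ a :: t) := by
        intro d hd
        rcases PySem.List.mem_pyRange_one.mp hd with ⟨h1, _⟩
        have : d ≠ a := by omega
        simp [this]
      rw [List.filter_congr hcong,
          List.filter_congr (fun d hd => by rw [hcong d hd] :
            ∀ d ∈ PySem.List.pyRange (a + 1) n 1,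
              (!decide (d ∈ t)) = (!decide (d ∈ a :: t)))]
    · -- new reduce dim a, with gap range (p+1, a) going spatial
      have hpa : p < a := lt_of_le_of_ne ha_lo (fun h => hap h.symm)
      simp only [List.foldl_cons]
      rw [if_pos (hap : a ≠ p)]
      rw [ih (r ++ [a]) (sp ++ PySem.List.pyRange (p + 1) a 1) a
        (List.pairwise_cons.mp hs).2 ht_ge (fun x hx => hhi x (by simp [hx]))]
      have hsplit : PySem.List.pyRange (p + 1) n 1
          = PySem.List.pyRange (p + 1) a 1 ++ (a :: PySem.List.pyRange (a + 1) n 1) := by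
        rw [PySem.List.pyRange_one_append (p + 1) a n (by omega) (by omega),
            PySem.List.pyRange_one_cons ha_hi]
      have hlowmem : ∀ d ∈ PySem.List.pyRange (p + 1) a 1, decide (d ∈ a :: t) = false := by
        intro d hd
        rcases PySem.List.mem_pyRange_one.mp hd with ⟨_, h2⟩
        simp only [decide_eq_false_iff_not, List.mem_cons, not_or]
        exact ⟨by omega, fun hx => absurd (ht_ge d hx) (by omega)⟩
      have hhimem : ∀ d ∈ PySem.List.pyRange (a + 1) n 1,
          decide (d ∈ a :: t) = decide (d ∈ t) := by
        intro d hd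
        rcases PySem.List.mem_pyRange_one.mp hd with ⟨h1, _⟩
        have : d ≠ a := by omega
        simp [this]
      have h1 : (PySem.List.pyRange (p + 1) n 1).filter (fun d => decide (d ∈ a :: t))
          = a :: (PySem.List.pyRange (a + 1) n 1).filter (fun d => decide (d ∈ t)) := by
        rw [hsplit, List.filter_append, List.filter_cons]
        rw [List.filter_eq_nil_iff.mpr (fun d hd => by rw [hlowmem d hd]; simp)]
        rw [if_pos (by simp : decide (a ∈ a :: t) = true)]
        rw [List.filter_congr hhimem]
        simp
      have h2 : (PySem.List.pyRange (p + 1) n 1).filter (fun d => !decide (d ∈ a :: t))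
          = PySem.List.pyRange (p + 1) a 1
            ++ (PySem.List.pyRange (a + 1) n 1).filter (fun d => !decide (d ∈ t)) := by
        rw [hsplit, List.filter_append, List.filter_cons]
        rw [List.filter_eq_self.mpr (fun d hd => by rw [hlowmem d hd]; simp)]
        rw [if_neg (by simp)]
        rw [List.filter_congr (fun d hd => by rw [hhimem d hd] :
          ∀ d ∈ PySem.List.pyRange (a + 1) n 1,
            (!decide (d ∈ a :: t)) = (!decide (d ∈ t)))]
      rw [h1, h2]
      simp [List.append_assoc]

-- A's set fold is Set.ofList of the normalized axes
theorem pv_foldl_add_eq_ofList (src_ndim : Int) (axes : List Int) :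
    axes.foldl (fun s ax => PySem.Set.add s (if ax ≥ 0 then ax else ax + src_ndim)) PySem.Set.empty
    = PySem.Set.ofList (axes.map (fun ax => if ax ≥ 0 then ax else ax + src_ndim)) := by
  rw [PySem.Set.ofList_eq_foldl, List.foldl_map]
  rfl

-- ===== VERDICT (by name: the statement is the Claim_ definition above) =====
theorem analyze_axes_py_spec : Claim_equal_analyze_axes_py := by
  intro n axes _hDom hPre
  unfold Spec_analyze_axes_py analyze_axes_py analyze_axes_py_alt
  set f : Int → Int := fun ax => if ax ≥ 0 then ax else ax + n with hf
  have hmem : ∀ x ∈ axes.map f, 0 ≤ x ∧ x < n := by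
    intro x hx
    rcases List.mem_map.mp hx with ⟨ax, hax, rfl⟩
    exact hPre ax hax
  -- B side
  rw [pv_norm_map n axes []]
  set s := PySem.List.sorted (([] : List Int) ++ axes.map f) (fun x => x) false with hsdef
  have hs_mem : ∀ x, x ∈ s ↔ x ∈ axes.map f := by
    intro x; rw [hsdef]; simp [PySem.List.mem_sorted]
  have hB := pv_gap_fold n s [] [] (-1)
    (by have := PySem.List.sorted_pairwise (([] : List Int) ++ axes.map f) (fun x => x); simpa using this)
    (by intro x hx; have := (hmem x ((hs_mem x).mp hx)).1; omega)
    (by intro x hx; exact (hmem x ((hs_mem x).mp hx)).2)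
  simp only [] at hB
  rw [hB]
  -- A side
  rw [pv_foldl_add_eq_ofList n axes]
  have hrange : (-1 : Int) + 1 = 0 := by norm_num
  rw [hrange]
  refine Prod.ext ?_ ?_
  · show PySem.List.sorted (PySem.Set.ofList (axes.map f)) (fun x => x) false
        = [] ++ (PySem.List.pyRange 0 n 1).filter (fun d => decide (d ∈ s))
    rw [List.nil_append]
    apply PySem.List.sorted_eq_of_perm_of_pairwise_lt
    · refine (List.perm_ext_iff_of_nodup
        (List.Nodup.filter _ (PySem.List.nodup_pyRange_one 0 n)) (PySem.Set.nodup_ofList _)).mpr ?_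
      intro x
      simp only [List.mem_filter, PySem.List.mem_pyRange_one, PySem.Set.mem_ofList,
        decide_eq_true_eq, hs_mem]
      constructor
      · rintro ⟨_, hx⟩; exact hx
      · intro hx; exact ⟨⟨(hmem x hx).1, (hmem x hx).2⟩, hx⟩
    · exact List.Pairwise.filter _ (PySem.List.pairwise_lt_pyRange_one 0 n)
  · show ((PySem.List.pyRange 0 n 1).filter
          fun d => !PySem.Set.contains (PySem.Set.ofList (axes.map f)) d)
        = [] ++ (PySem.List.pyRange 0 n 1).filter (fun d => !(decide (d ∈ s)))
    rw [List.nil_append]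
    apply List.filter_congr
    intro d _
    rw [PySem.Set.contains_eq_decide]
    simp [PySem.Set.mem_ofList, hs_mem]
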